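-- pv_equiv track=rewrite | github.com/neha91192/machine_learning | Assignment1/Housing.py | generate_feature_label
-- ===== SOURCE A (Python) =====
-- def generate_feature_label(data):
--     feature_table = {}
--     for entry in data:
--         for i, feature in enumerate(entry):
--             if i in feature_table:
--                 values = feature_table.get(i)
--             else:
--                 values = []
--             values.append(feature)
--             feature_table[i] = values
--     label = feature_table[len(feature_table) - 1]
--     feature_table.pop(len(feature_table) - 1)
--
--     return feature_table, label
-- ===== SOURCE B (Python) =====
-- def generate_feature_label(data):
--     # column-major: find the widest row, then gather each column directly
--     m = 0
--     for entry in data: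
--         m = max(m, len(entry))
--     feature_table = {i: [entry[i] for entry in data if i < len(entry)] for i in range(m)}
--     label = feature_table.pop(m - 1)
--     return feature_table, label
-- ===== Notes on version B (the rewrite author's own statement) =====
-- stated objective: alternative
-- what changed: Row-major dict-of-appends loop replaced by a column-major build: compute the max row length once, gather each column with one comprehension per index, and pop the last column as the label.
import Mathlib
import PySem

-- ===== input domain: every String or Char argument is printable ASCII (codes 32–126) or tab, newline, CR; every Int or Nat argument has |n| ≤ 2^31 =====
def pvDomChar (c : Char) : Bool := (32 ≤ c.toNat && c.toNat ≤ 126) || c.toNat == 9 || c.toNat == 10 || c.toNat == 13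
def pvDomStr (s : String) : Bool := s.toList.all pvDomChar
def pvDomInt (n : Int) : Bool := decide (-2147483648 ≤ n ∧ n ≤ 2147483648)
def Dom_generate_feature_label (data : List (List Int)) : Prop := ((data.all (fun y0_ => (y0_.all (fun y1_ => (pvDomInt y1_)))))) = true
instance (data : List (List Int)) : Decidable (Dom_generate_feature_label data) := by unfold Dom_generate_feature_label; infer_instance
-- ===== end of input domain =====

-- B replaces A's row-major dict-of-appends loop by a column-major build (max row length,
-- then one gather per column index); equivalence of the RETURN value is proved on Pre_.

-- ===== PORT A =====
-- inner-loop body of A: values = ft.get(i) if i in ft else []; values.append(feature); ft[i] = values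
def gflStep (ft : PySem.Dict Int (List Int)) (p : Int × Int) : PySem.Dict Int (List Int) :=
  let values := if ft.contains p.1 then (ft.get? p.1).getD [] else []
  ft.insert p.1 (values ++ [p.2])

def generate_feature_label (data : List (List Int)) : (List (Int × List Int)) × List Int :=
  let ft : PySem.Dict Int (List Int) :=
    data.foldl (fun ft entry => (PySem.List.enumerate entry 0).foldl gflStep ft) PySem.Dict.empty
  -- feature_table[len(feature_table) - 1]: KeyError (empty table) is excluded by Pre_
  let label := ft.getD ((ft.size : Int) - 1) []
  let ft2 := ft.erase ((ft.size : Int) - 1)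
  (ft2.items, label)

-- ===== PORT B =====
-- m = running max of row lengths; {i: [entry[i] for entry in data if i < len(entry)] for i in range(m)};
-- label = table.pop(m - 1).  'if i < len(entry): entry[i]' is exactly pyGet? being some, since i ≥ 0 here.
def generate_feature_label_alt (data : List (List Int)) : (List (Int × List Int)) × List Int :=
  let m : Int := data.foldl (fun n entry => max n (entry.length : Int)) 0
  let ft : PySem.Dict Int (List Int) :=
    PySem.Dict.ofList ((PySem.List.pyRange 0 m 1).map
      (fun i => (i, data.filterMap (fun entry => PySem.List.pyGet? entry i))))
  match ft.pop? (m - 1) with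
  | some (label, ft2) => (ft2.items, label)
  | none => ([], [])  -- KeyError; excluded by Pre_

-- ===== PRECONDITION & SPEC =====
-- Pre_ excludes exactly the inputs where Python A raises KeyError: data with no nonempty row.
def Pre_generate_feature_label (data : List (List Int)) : Prop := ∃ e ∈ data, e ≠ []
instance (data : List (List Int)) : Decidable (Pre_generate_feature_label data) := by
  unfold Pre_generate_feature_label; infer_instance

def pvWitness_generate_feature_label : List (List Int) := [[1, 2], [3]]

def Spec_generate_feature_label (data : List (List Int)) (out : (List (Int × List Int)) × List Int) : Prop := out = generate_feature_label_alt data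
instance (data : List (List Int)) (out : (List (Int × List Int)) × List Int) : Decidable (Spec_generate_feature_label data out) := by unfold Spec_generate_feature_label; infer_instance

-- ===== CLAIM (what is proved, stated in full; the proofs are below) =====
def Claim_equal_generate_feature_label : Prop := ∀ (data : List (List Int)), Dom_generate_feature_label data → Pre_generate_feature_label data → Spec_generate_feature_label data (generate_feature_label data)

-- ===== LEMMAS AND PROOFS =====

-- proof-side canonical table: keys 0..N-1 in order, value c k at key k
def mkTab (N : Nat) (c : Int → List Int) : PySem.Dict Int (List Int) :=
  PySem.Dict.mk ((List.range N).map (fun k : Nat => ((k : Int), c (k : Int))))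

-- column i of the data, and the running maximum of row lengths
def colOf (data : List (List Int)) (i : Int) : List Int :=
  data.filterMap (fun entry => PySem.List.pyGet? entry i)

def maxLen (data : List (List Int)) : Nat :=
  data.foldl (fun n e => max n e.length) 0

theorem mkTab_contains_iff (N : Nat) (c : Int → List Int) (i : Int) :
    (mkTab N c).contains i = true ↔ 0 ≤ i ∧ i < (N : Int) := by
  simp only [mkTab, PySem.Dict.contains, List.any_map, List.any_eq_true, List.mem_range,
    Function.comp]
  constructor
  · rintro ⟨k, hk, hbeq⟩
    have : ((k : Int)) = i := by simpa using hbeq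
    omega
  · rintro ⟨h0, hN⟩
    exact ⟨i.toNat, by omega, by simp; omega⟩

theorem mkTab_keys_nodup (N : Nat) (c : Int → List Int) : (mkTab N c).keys.Nodup := by
  simp only [mkTab, PySem.Dict.keys, List.map_map]
  have : ((fun p : Int × List Int => p.1) ∘ fun k : Nat => ((k : Int), c k))
      = (fun k : Nat => (k : Int)) := rfl
  rw [this]
  exact List.nodup_range.map (fun a b h => by exact_mod_cast h)

theorem mkTab_get? (N : Nat) (c : Int → List Int) (k : Nat) (h : k < N) :
    (mkTab N c).get? (k : Int) = some (c k) := by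
  apply PySem.Dict.get?_of_mem_items
  · simp only [mkTab]
    exact List.mem_map.mpr ⟨k, List.mem_range.mpr h, rfl⟩
  · exact mkTab_keys_nodup N c

theorem mkTab_size (N : Nat) (c : Int → List Int) : (mkTab N c).size = N := by
  simp [mkTab, PySem.Dict.size]

theorem mkTab_congr (N : Nat) (c c' : Int → List Int)
    (h : ∀ k : Nat, k < N → c (k : Int) = c' (k : Int)) : mkTab N c = mkTab N c' := by
  unfold mkTab
  congr 1
  exact List.map_congr_left (fun k hk => by rw [h k (List.mem_range.mp hk)])

theorem mkTab_insert_lt (N : Nat) (c : Int → List Int) (k : Nat) (v : List Int) (h : k < N) :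
    (mkTab N c).insert (k : Int) v = mkTab N (fun i => if i = (k : Int) then v else c i) := by
  unfold PySem.Dict.insert
  rw [if_pos ((mkTab_contains_iff N c k).mpr ⟨by omega, by omega⟩)]
  unfold mkTab
  congr 1
  rw [List.map_map]
  refine List.map_congr_left (fun j hj => ?_)
  by_cases hjk : j = k
  · subst hjk; simp
  · have h1 : (((j : Int)) == (k : Int)) = false := by
      simp; omega
    have h2 : ((j : Int)) ≠ (k : Int) := by exact_mod_cast hjk
    simp [Function.comp, h1, h2]

theorem mkTab_insert_eq (N : Nat) (c : Int → List Int) (v : List Int) :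
    (mkTab N c).insert (N : Int) v = mkTab (N + 1) (fun i => if i = (N : Int) then v else c i) := by
  unfold PySem.Dict.insert
  rw [if_neg (by rw [mkTab_contains_iff]; push Not; intro _; omega)]
  unfold mkTab
  congr 1
  rw [List.range_succ, List.map_append]
  congr 1
  · refine List.map_congr_left (fun j hj => ?_)
    have : ((j : Int)) ≠ (N : Int) := by
      have := List.mem_range.mp hj; exact_mod_cast Nat.ne_of_lt this
    simp [this]
  · simp

theorem inner_eq (r : List Int) : ∀ (s N : Nat) (c : Int → List Int), s ≤ N →
    (PySem.List.enumerate r (s : Int)).foldl gflStep (mkTab N c)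
    = mkTab (max N (s + r.length)) (fun i =>
        if (s : Int) ≤ i ∧ i < (s : Int) + (r.length : Int)
        then (if i < (N : Int) then c i else []) ++ [r.getD (i.toNat - s) 0]
        else c i) := by
  induction r with
  | nil =>
    intro s N c hsN
    simp only [PySem.List.enumerate_nil, List.foldl_nil, List.length_nil, Nat.add_zero,
      Nat.max_eq_left hsN]
    refine (mkTab_congr N _ _ (fun k hk => ?_)).symm
    rw [if_neg (by push_cast; omega)]
  | cons x r ih =>
    intro s N c hsN
    rw [PySem.List.enumerate_cons]
    simp only [List.foldl_cons]
    have hstep : gflStep (mkTab N c) ((s : Int), x)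
        = mkTab (max N (s + 1)) (fun i => if i = (s : Int)
            then (if (s : Int) < (N : Int) then c (s : Int) else []) ++ [x] else c i) := by
      by_cases hlt : s < N
      · have hcont : (mkTab N c).contains ((s : Int)) = true :=
          (mkTab_contains_iff N c s).mpr ⟨by omega, by omega⟩
        unfold gflStep
        simp only [hcont, if_true, mkTab_get? N c s hlt, Option.getD_some]
        rw [mkTab_insert_lt N c s _ hlt, Nat.max_eq_left (by omega)]
        exact mkTab_congr N _ _ (fun k hk => by
          by_cases h : ((k : Int)) = (s : Int) <;> simp [h, hlt])
      · have hs : s = N := by omega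
        subst hs
        have hcont : (mkTab s c).contains ((s : Int)) = false := by
          rw [Bool.eq_false_iff]
          intro h
          have := (mkTab_contains_iff s c s).mp h
          omega
        unfold gflStep
        simp only [hcont, Bool.false_eq_true, if_false]
        rw [mkTab_insert_eq s c, Nat.max_eq_right (by omega)]
        exact mkTab_congr (s + 1) _ _ (fun k hk => by
          by_cases h : ((k : Int)) = (s : Int) <;> simp [h])
    rw [hstep]
    have hcast : ((s : Int)) + 1 = (((s + 1 : Nat)) : Int) := by push_cast; ring
    rw [hcast, ih (s + 1) (max N (s + 1)) _ (le_max_right _ _)]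
    have hsz : max (max N (s + 1)) (s + 1 + r.length) = max N (s + (x :: r).length) := by
      simp only [List.length_cons]; omega
    rw [hsz]
    refine mkTab_congr _ _ _ (fun k hk => ?_)
    simp only [List.length_cons] at hk
    by_cases h1 : s + 1 ≤ k ∧ k < s + 1 + r.length
    · -- inside the tail of the row
      have hcondL : (((s + 1 : Nat)) : Int) ≤ (k : Int)
          ∧ (k : Int) < (((s + 1 : Nat)) : Int) + (r.length : Int) := by push_cast; omega
      have hcondR : (s : Int) ≤ (k : Int)
          ∧ (k : Int) < (s : Int) + ((x :: r).length : Int) := by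
        push_cast [List.length_cons]; omega
      have hne : ((k : Int)) ≠ (s : Int) := by
        have : k ≠ s := by omega
        exact_mod_cast this
      rw [if_pos hcondL, if_pos hcondR, if_neg hne]
      have htoNat : (((k : Int)).toNat) = k := by omega
      rw [htoNat]
      have hidx : k - s = (k - (s + 1)) + 1 := by omega
      rw [hidx, List.getD_cons_succ]
      have hNN : ((k : Int) < ((max N (s + 1) : Nat) : Int)) ↔ ((k : Int) < (N : Int)) := by
        simp only [Nat.cast_lt]
        omega
      by_cases hN2 : (k : Int) < (N : Int)
      · rw [if_pos (hNN.mpr hN2), if_pos hN2]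
      · rw [if_neg (fun h => hN2 (hNN.mp h)), if_neg hN2]
    · by_cases h2 : k = s
      · subst h2
        have hcL : ¬ ((((k + 1 : Nat)) : Int) ≤ (k : Int)
            ∧ (k : Int) < (((k + 1 : Nat)) : Int) + (r.length : Int)) := by push_cast; omega
        have hcR : (k : Int) ≤ (k : Int)
            ∧ (k : Int) < (k : Int) + ((x :: r).length : Int) := by
          push_cast [List.length_cons]; omega
        rw [if_neg hcL, if_pos rfl, if_pos hcR]
        have htoNat : (((k : Int)).toNat) = k := by omega
        rw [htoNat, Nat.sub_self, List.getD_cons_zero]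
      · -- outside the row segment entirely
        have hcL : ¬ ((((s + 1 : Nat)) : Int) ≤ (k : Int)
            ∧ (k : Int) < (((s + 1 : Nat)) : Int) + (r.length : Int)) := by push_cast; omega
        have hcR : ¬ ((s : Int) ≤ (k : Int)
            ∧ (k : Int) < (s : Int) + ((x :: r).length : Int)) := by
          push_cast [List.length_cons]; omega
        have hne : ((k : Int)) ≠ (s : Int) := by exact_mod_cast h2
        rw [if_neg hcL, if_neg hne, if_neg hcR]

theorem le_maxLen_aux (l : List (List Int)) : ∀ (a : Nat),
    a ≤ l.foldl (fun n e => max n e.length) a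
    ∧ ∀ e ∈ l, e.length ≤ l.foldl (fun n e => max n e.length) a := by
  induction l with
  | nil => intro a; simp
  | cons x l ih =>
    intro a
    refine ⟨le_trans (le_max_left _ _) (ih (max a x.length)).1, ?_⟩
    intro e he
    rcases List.mem_cons.mp he with rfl | he
    · exact le_trans (le_max_right _ _) (ih (max a e.length)).1
    · exact (ih (max a x.length)).2 e he

theorem len_le_maxLen (data : List (List Int)) (e : List Int) (he : e ∈ data) :
    e.length ≤ maxLen data := (le_maxLen_aux data 0).2 e he

theorem colOf_eq_nil_of_ge (data : List (List Int)) (k : Nat)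
    (h : ∀ e ∈ data, e.length ≤ k) : colOf data (k : Int) = [] := by
  rw [colOf, List.filterMap_eq_nil_iff]
  intro e he
  simp only [PySem.List.pyGet?_natCast]
  exact List.getElem?_eq_none (h e he)

theorem outer_eq (data : List (List Int)) :
    data.foldl (fun ft entry => (PySem.List.enumerate entry 0).foldl gflStep ft) PySem.Dict.empty
    = mkTab (maxLen data) (colOf data) := by
  induction data using List.reverseRecOn with
  | nil => rfl
  | append_singleton rows r ih =>
    rw [List.foldl_append, List.foldl_cons, List.foldl_nil, ih]
    have h0 : (0 : Int) = ((0 : Nat) : Int) := rfl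
    rw [h0, inner_eq r 0 (maxLen rows) (colOf rows) (Nat.zero_le _)]
    have hsz : max (maxLen rows) (0 + r.length) = maxLen (rows ++ [r]) := by
      simp [maxLen, List.foldl_append]
    rw [hsz]
    refine mkTab_congr _ _ _ (fun k hk => ?_)
    have hcol : colOf (rows ++ [r]) (k : Int)
        = colOf rows (k : Int) ++ (PySem.List.pyGet? r (k : Int)).toList := by
      simp only [colOf, List.filterMap_append]
      congr 1
    rw [hcol]
    by_cases hkr : k < r.length
    · rw [if_pos (by push_cast; omega)]
      have hget : PySem.List.pyGet? r (k : Int) = some (r.getD k 0) := by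
        rw [PySem.List.pyGet?_natCast, List.getElem?_eq_getElem hkr, List.getD_eq_getElem _ _ hkr]
      rw [hget]
      have htoNat : (((k : Int)).toNat) = k := by omega
      rw [htoNat, Nat.sub_zero]
      by_cases hN : ((k : Int)) < ((maxLen rows : Nat) : Int)
      · rw [if_pos hN]; simp
      · rw [if_neg hN]
        have : colOf rows (k : Int) = [] := by
          refine colOf_eq_nil_of_ge rows k (fun e he => ?_)
          have h1 := len_le_maxLen rows e he
          push_cast at hN
          omega
        rw [this]
        simp
    · rw [if_neg (by push_cast; omega)]
      have : PySem.List.pyGet? r (k : Int) = none := by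
        rw [PySem.List.pyGet?_natCast]
        exact List.getElem?_eq_none (by omega)
      rw [this]
      simp

theorem foldl_max_len_aux (l : List (List Int)) : ∀ (a : Nat),
    l.foldl (fun n entry => max n (entry.length : Int)) ((a : Int))
    = ((l.foldl (fun n e => max n e.length) a : Nat) : Int) := by
  induction l with
  | nil => intro a; rfl
  | cons x l ih =>
    intro a
    simp only [List.foldl_cons]
    have : max ((a : Int)) ((x.length : Int)) = (((max a x.length : Nat)) : Int) := by
      rw [Nat.cast_max]
    rw [this, ih]

theorem foldl_max_len (data : List (List Int)) :
    data.foldl (fun n entry => max n (entry.length : Int)) 0 = ((maxLen data : Nat) : Int) := by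
  have h := foldl_max_len_aux data 0
  simpa [maxLen] using h

theorem mkTab_erase_last (N : Nat) (c : Int → List Int) (h : 1 ≤ N) :
    (mkTab N c).erase (((N - 1 : Nat)) : Int) = mkTab (N - 1) c := by
  obtain ⟨M, rfl⟩ : ∃ M, N = M + 1 := ⟨N - 1, by omega⟩
  simp only [Nat.add_sub_cancel]
  unfold PySem.Dict.erase mkTab
  congr 1
  rw [List.range_succ, List.map_append, List.filter_append]
  have h1 : List.filter (fun p => !p.1 == ((M : Nat) : Int))
      ((List.range M).map (fun k : Nat => ((k : Int), c (k : Int))))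
      = (List.range M).map (fun k : Nat => ((k : Int), c (k : Int))) := by
    refine List.filter_eq_self.mpr (fun p hp => ?_)
    rcases List.mem_map.mp hp with ⟨k, hk, rfl⟩
    have hk' := List.mem_range.mp hk
    simp only [Bool.not_eq_eq_eq_not, Bool.not_true, beq_eq_false_iff_ne, ne_eq]
    intro hcon
    have : k = M := by exact_mod_cast hcon
    omega
  have h2 : List.filter (fun p => !p.1 == ((M : Nat) : Int))
      (List.map (fun k : Nat => ((k : Int), c (k : Int))) [M]) = [] := by simp
  rw [h1, h2, List.append_nil]

theorem ofList_eq_mkTab (N : Nat) (data : List (List Int)) :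
    PySem.Dict.ofList ((PySem.List.pyRange 0 (N : Int) 1).map
      (fun i => (i, data.filterMap (fun entry => PySem.List.pyGet? entry i))))
    = mkTab N (colOf data) := by
  apply PySem.Dict.ext
  have hrange : PySem.List.pyRange 0 (N : Int) 1 = (List.range N).map (fun k : Nat => ((k : Int))) := by
    rw [PySem.List.pyRange_one]
    simp
  rw [hrange, List.map_map]
  unfold PySem.Dict.ofList PySem.Dict.update
  rw [PySem.Dict.items_foldl_insert_fresh (k := Prod.fst) (v := Prod.snd)]
  · simp [PySem.Dict.empty, mkTab, colOf, List.map_map, Function.comp]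
  · intro a _; exact PySem.Dict.contains_empty _
  · rw [List.map_map]
    exact List.nodup_range.map (fun a b hab => by simpa using hab)

theorem maxLen_pos (data : List (List Int)) (h : Pre_generate_feature_label data) :
    1 ≤ maxLen data := by
  obtain ⟨e, he, hne⟩ := h
  have h1 := len_le_maxLen data e he
  have h2 : 1 ≤ e.length := by
    cases e with
    | nil => exact absurd rfl hne
    | cons _ _ => simp
  omega

-- ===== VERDICT (by name: the statement is the Claim_ definition above) =====
theorem generate_feature_label_spec : Claim_equal_generate_feature_label := by
  intro data _ hpre
  unfold Spec_generate_feature_label generate_feature_label generate_feature_label_alt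
  have hN : 1 ≤ maxLen data := maxLen_pos data hpre
  simp only [outer_eq data, foldl_max_len data, ofList_eq_mkTab (maxLen data) data]
  simp only [mkTab_size]
  have hcast : ((maxLen data : Int)) - 1 = (((maxLen data - 1 : Nat)) : Int) := by
    push_cast; omega
  rw [hcast]
  have hget : (mkTab (maxLen data) (colOf data)).get? (((maxLen data - 1 : Nat)) : Int)
      = some (colOf data (((maxLen data - 1 : Nat)) : Int)) :=
    mkTab_get? (maxLen data) _ (maxLen data - 1) (by omega)
  have hpop : (mkTab (maxLen data) (colOf data)).pop? (((maxLen data - 1 : Nat)) : Int)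
      = some (colOf data (((maxLen data - 1 : Nat)) : Int),
          (mkTab (maxLen data) (colOf data)).erase (((maxLen data - 1 : Nat)) : Int)) := by
    unfold PySem.Dict.pop?
    rw [hget]
    rfl
  rw [hpop, mkTab_erase_last (maxLen data) _ hN]
  unfold PySem.Dict.getD
  rw [hget]
  rfl
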